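-- pv_equiv track=rewrite | github.com/SpectreDeath/skill-flywheel | src/skills/logic/sat_solver_optimization.py | mom_heuristic
-- ===== SOURCE A (Python) =====
-- from typing import List, Dict, Any, Tuple, Optional, Set, Union
-- from collections import defaultdict, deque
--
-- def mom_heuristic(clauses: List[List[int]]) -> Optional[Tuple[int, bool]]:
--     """MOMS (Maximum Occurrences in clauses of Minimum Size) heuristic."""
--     if not clauses:
--         return None, None
--
--     min_clause_size = min(len(clause) for clause in clauses if clause)
--
--     # Find clauses of minimum size
--     min_clauses = [clause for clause in clauses
--                   if len(clause) == min_clause_size]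
--
--     # Count literal occurrences
--     literal_counts = defaultdict(int)
--     for clause in min_clauses:
--         for literal in clause:
--             literal_counts[literal] += 1
--
--     # Select literal with maximum count
--     if literal_counts:
--         best_literal = max(literal_counts.keys(),
--                          key=lambda lit: literal_counts[lit])
--         return abs(best_literal), best_literal > 0
--
--     return None, None
-- ===== SOURCE B (Python) =====
-- def mom_heuristic(clauses):
--     """MOMS heuristic: one pass over clauses tracking the current minimum
--     clause size and a running count dict (reset when a smaller size appears)."""
--     if not clauses:
--         return None, None
--     current_min = None
--     counts = {}
--     for clause in clauses:
--         if not clause: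
--             continue
--         n = len(clause)
--         if current_min is None or n < current_min:
--             current_min = n
--             counts = {}
--         if n == current_min:
--             for lit in clause:
--                 counts[lit] = counts.get(lit, 0) + 1
--     if not counts:
--         return None, None
--     best, best_count = None, -1
--     for lit, c in counts.items():
--         if c > best_count:
--             best, best_count = lit, c
--     return abs(best), best > 0
-- ===== Notes on version B (the rewrite author's own statement) =====
-- stated objective: alternative
-- what changed: Replaces A's three passes (min over sizes, filter of min-size clauses, count-then-max) by a single pass that tracks the running minimum size and resets/accumulates a count dict on the fly, then a strict-greater scan over the counts for the best literal.
-- crash fix: On a non-empty clause list whose clauses are all empty, A raises ValueError (min of an empty sequence) while B returns (None, None). — e.g. on mom_heuristic([[]]): A raises ValueError, B returns (none, none)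
import Mathlib
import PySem

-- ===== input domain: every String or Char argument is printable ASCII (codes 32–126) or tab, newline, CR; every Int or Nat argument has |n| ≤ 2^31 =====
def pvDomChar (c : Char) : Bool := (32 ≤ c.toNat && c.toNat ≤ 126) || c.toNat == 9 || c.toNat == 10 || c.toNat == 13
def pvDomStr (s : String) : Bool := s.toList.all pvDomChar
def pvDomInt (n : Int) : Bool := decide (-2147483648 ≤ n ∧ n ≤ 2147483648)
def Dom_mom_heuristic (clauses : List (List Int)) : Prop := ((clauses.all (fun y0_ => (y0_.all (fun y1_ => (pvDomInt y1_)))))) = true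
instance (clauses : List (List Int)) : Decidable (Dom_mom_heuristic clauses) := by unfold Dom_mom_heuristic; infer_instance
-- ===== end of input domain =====

-- B: single pass tracking the running minimum clause size with an on-the-fly count dict
-- (reset on a smaller size), instead of A's min / filter / count-then-max passes.


-- ===== PORT A =====
def mom_heuristic (clauses : List (List Int)) : Option Int × Option Bool :=
  if clauses.isEmpty then (none, none) else
  match PySem.List.min? ((clauses.filter (fun c => !c.isEmpty)).map (fun c => c.length)) (fun x => x) with
  | none => (none, none)  -- Python raises ValueError here (min of empty sequence); excluded by Pre_
  | some min_clause_size =>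
    let min_clauses := clauses.filter (fun c => c.length == min_clause_size)
    let literal_counts := min_clauses.foldl
      (fun d clause => clause.foldl (fun d lit => d.modify lit 0 (· + 1)) d)
      (PySem.Dict.empty : PySem.Dict Int Int)
    if literal_counts.size ≠ 0 then
      match PySem.List.max? literal_counts.keys (fun lit => literal_counts.getD lit 0) with
      | some best => (some |best|, some (decide (0 < best)))
      | none => (none, none)
    else (none, none)

-- ===== PORT B =====
def momAltStep (st : Option Nat × PySem.Dict Int Int) (c : List Int) :
    Option Nat × PySem.Dict Int Int :=
  if c = [] then st
  else
    let n := c.length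
    let reset : Bool := match st.1 with | none => true | some m => decide (n < m)
    let m := if reset then n else st.1.getD n
    let counts := if reset then PySem.Dict.empty else st.2
    if n = m then (some m, c.foldl (fun d lit => d.insert lit (d.getD lit 0 + 1)) counts)
    else (some m, counts)

def mom_heuristic_alt (clauses : List (List Int)) : Option Int × Option Bool :=
  if clauses = [] then (none, none) else
  let st := clauses.foldl momAltStep (none, PySem.Dict.empty)
  if st.2.size = 0 then (none, none) else
  let best := st.2.items.foldl
    (fun acc p => if acc.2 < p.2 then (some p.1, p.2) else acc)
    ((none : Option Int), (-1 : Int))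
  match best.1 with
  | some b => (some |b|, some (decide (0 < b)))
  | none => (none, none)

-- ===== PRECONDITION & SPEC =====
-- Pre_ excludes exactly the inputs on which A raises ValueError: a non-empty list of
-- clauses all of which are empty (min() of an empty generator).
def Pre_mom_heuristic (clauses : List (List Int)) : Prop :=
  clauses = [] ∨ ∃ c ∈ clauses, c ≠ []
instance (clauses : List (List Int)) : Decidable (Pre_mom_heuristic clauses) := by
  unfold Pre_mom_heuristic; infer_instance
def pvWitness_mom_heuristic : List (List Int) := [[1, -2], [2], [-2, 3]]

-- On a non-empty clause list whose clauses are all empty, A raises ValueError while B returns (none, none).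
def Raises_mom_heuristic (clauses : List (List Int)) : Prop :=
  clauses ≠ [] ∧ ∀ c ∈ clauses, c = []
instance (clauses : List (List Int)) : Decidable (Raises_mom_heuristic clauses) := by
  unfold Raises_mom_heuristic; infer_instance
def pvRaiseWitness_mom_heuristic : List (List Int) := [[]]
def pvRaiseWitnessOut_mom_heuristic : Option Int × Option Bool := (none, none)

def Spec_mom_heuristic (clauses : List (List Int)) (out : Option Int × Option Bool) : Prop := out = mom_heuristic_alt clauses
instance (clauses : List (List Int)) (out : Option Int × Option Bool) : Decidable (Spec_mom_heuristic clauses out) := by unfold Spec_mom_heuristic; infer_instance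

-- ===== CLAIM (what is proved, stated in full; the proofs are below) =====
def Claim_equal_mom_heuristic : Prop := ∀ (clauses : List (List Int)), Dom_mom_heuristic clauses → Pre_mom_heuristic clauses → Spec_mom_heuristic clauses (mom_heuristic clauses)
def Claim_raises_mom_heuristic : Prop := (∀ (clauses : List (List Int)), Dom_mom_heuristic clauses → Raises_mom_heuristic clauses → ¬ Pre_mom_heuristic clauses) ∧ (Dom_mom_heuristic (pvRaiseWitness_mom_heuristic) ∧ Raises_mom_heuristic (pvRaiseWitness_mom_heuristic) ∧ mom_heuristic_alt (pvRaiseWitness_mom_heuristic) = pvRaiseWitnessOut_mom_heuristic)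

-- ===== LEMMAS AND PROOFS =====

-- the running minimum of B's pass, as a fold
def runMin (l : List (List Int)) (m : Nat) : Nat :=
  l.foldl (fun a c => if c = [] then a else min a c.length) m

-- the counting step shared (definitionally) by both ports
def ins (d : PySem.Dict Int Int) (lit : Int) : PySem.Dict Int Int :=
  d.insert lit (d.getD lit 0 + 1)

lemma step_empty (st : Option Nat × PySem.Dict Int Int) : momAltStep st [] = st := by
  simp [momAltStep]

lemma step_none (d : PySem.Dict Int Int) (c : List Int) (hc : c ≠ []) :
    momAltStep (none, d) c = (some c.length, c.foldl ins PySem.Dict.empty) := by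
  simp [momAltStep, hc]; rfl

lemma step_lt (m : Nat) (d : PySem.Dict Int Int) (c : List Int) (hc : c ≠ []) (h : c.length < m) :
    momAltStep (some m, d) c = (some c.length, c.foldl ins PySem.Dict.empty) := by
  simp [momAltStep, hc, h]; rfl

lemma step_eq (m : Nat) (d : PySem.Dict Int Int) (c : List Int) (hc : c ≠ []) (h : c.length = m) :
    momAltStep (some m, d) c = (some m, c.foldl ins d) := by
  subst h; simp [momAltStep, hc]; rfl

lemma step_gt (m : Nat) (d : PySem.Dict Int Int) (c : List Int) (hc : c ≠ []) (h : m < c.length) :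
    momAltStep (some m, d) c = (some m, d) := by
  have h1 : ¬ c.length < m := by omega
  have h2 : c.length ≠ m := by omega
  simp [momAltStep, hc, h1, h2]

lemma runMin_cons_empty (t : List (List Int)) (m : Nat) : runMin ([] :: t) m = runMin t m := by
  simp [runMin]

lemma runMin_cons (c : List Int) (t : List (List Int)) (m : Nat) (hc : c ≠ []) :
    runMin (c :: t) m = runMin t (min m c.length) := by
  simp [runMin, hc]

lemma runMin_le (l : List (List Int)) : ∀ m, runMin l m ≤ m := by
  induction l with
  | nil => intro m; exact le_rfl
  | cons c t ih =>
    intro m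
    by_cases hc : c = [] <;> simp [runMin, List.foldl_cons, hc] at *
    · exact ih m
    · exact le_trans (ih _) (min_le_left _ _)

lemma runMin_pos (l : List (List Int)) : ∀ m, 0 < m → 0 < runMin l m := by
  induction l with
  | nil => intro m hm; exact hm
  | cons c t ih =>
    intro m hm
    by_cases hc : c = [] <;> simp [runMin, List.foldl_cons, hc]
    · exact ih m hm
    · exact ih _ (by have : 0 < c.length := List.length_pos_iff.mpr hc; omega)

-- B's pass from a live state (some m, d), m > 0
lemma momAltStep_run (l : List (List Int)) : ∀ (m : Nat) (d : PySem.Dict Int Int), 0 < m →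
    l.foldl momAltStep (some m, d) =
      (some (runMin l m),
       if runMin l m < m
       then ((l.filter (fun c => c.length == runMin l m)).flatten).foldl ins PySem.Dict.empty
       else ((l.filter (fun c => c.length == m)).flatten).foldl ins d) := by
  induction l with
  | nil => intro m d hm; simp [runMin]
  | cons c t ih =>
    intro m d hm
    by_cases hc : c = []
    · subst hc
      have hpos := runMin_pos t m hm
      rw [List.foldl_cons, step_empty, ih m d hm, runMin_cons_empty]
      have hne : ¬ (0 = runMin t m) := by omega
      have hne2 : ¬ (0 = m) := by omega
      simp [hne, hne2]
    · have hlen : 0 < c.length := List.length_pos_iff.mpr hc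
      rw [runMin_cons c t m hc]
      rcases lt_trichotomy c.length m with hlt | heq | hgt
      · -- smaller clause: reset
        rw [List.foldl_cons, step_lt m d c hc hlt,
            ih c.length _ hlen, min_eq_right (le_of_lt hlt)]
        rcases lt_or_eq_of_le (runMin_le t c.length) with h2 | h2
        · have hcne : (c.length == runMin t c.length) = false := by simp; omega
          simp [h2, lt_trans h2 hlt, hcne]
        · simp [h2, hlt, List.foldl_append]
      · -- equal: accumulate into d
        rw [List.foldl_cons, step_eq m d c hc heq, ih m _ hm, heq, min_self]
        rcases lt_or_eq_of_le (runMin_le t m) with h2 | h2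
        · have hcne : (c.length == runMin t m) = false := by simp; omega
          simp [h2, hcne]
        · simp [h2, heq, List.foldl_append]
      · -- larger clause: skipped
        rw [List.foldl_cons, step_gt m d c hc hgt, ih m d hm, min_eq_left (le_of_lt hgt)]
        have hle := runMin_le t m
        have hcne : (c.length == runMin t m) = false := by simp; omega
        have hcne2 : (c.length == m) = false := by simp; omega
        simp [hcne, hcne2]

-- B's pass from the initial state, once some clause is non-empty
lemma momAlt_run_none (l : List (List Int)) (h : ∃ c ∈ l, c ≠ []) :
    ∃ m : Nat, 0 < m ∧
      PySem.List.min? ((l.filter (fun c => !c.isEmpty)).map (fun c => c.length)) (fun x => x) = some m ∧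
      l.foldl momAltStep (none, PySem.Dict.empty) =
        (some m, ((l.filter (fun c => c.length == m)).flatten).foldl ins PySem.Dict.empty) := by
  induction l with
  | nil => simp at h
  | cons c t ih =>
    by_cases hc : c = []
    · obtain ⟨c', hc', hne⟩ := h
      rcases List.mem_cons.mp hc' with h1 | h1
      · exact absurd (h1 ▸ hc) hne
      · obtain ⟨m, hm, hmin, hrun⟩ := ih ⟨c', h1, hne⟩
        refine ⟨m, hm, ?_, ?_⟩
        · simpa [List.filter_cons, hc] using hmin
        · subst hc
          rw [List.foldl_cons, step_empty, hrun]
          have hz : ¬ (0 = m) := by omega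
          simp [hz]
    · have hlen : 0 < c.length := List.length_pos_iff.mpr hc
      refine ⟨runMin t c.length, runMin_pos t _ hlen, ?_, ?_⟩
      · -- A's min over the filtered lengths equals B's running min
        have hfc : (!c.isEmpty) = true := by simp [hc]
        rw [List.filter_cons, if_pos hfc, List.map_cons, PySem.List.min?_id_cons]
        congr 1
        rw [List.foldl_map, List.foldl_filter]
        unfold runMin
        apply List.foldl_ext
        intro b c' _
        by_cases hc' : c' = [] <;> simp [hc']
      · rw [List.foldl_cons, step_none _ c hc, momAltStep_run t c.length _ hlen]
        rcases lt_or_eq_of_le (runMin_le t c.length) with h2 | h2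
        · have hcne : (c.length == runMin t c.length) = false := by simp; omega
          simp [h2, hcne]
        · simp [h2, List.foldl_append]

-- the final strict-greater scan over (key, value) pairs computes Python's max(keys, key=v)
lemma foldl_pairs_max (v : Int → Int) (ks : List Int) :
    ∀ (o : Option Int), (∀ k ∈ ks, -1 < v k) →
      (o = none ∨ ∃ m, o = some m ∧ -1 < v m) →
      (ks.map (fun k => (k, v k))).foldl
          (fun acc p => if acc.2 < p.2 then (some p.1, p.2) else acc)
          (match o with | none => ((none : Option Int), (-1 : Int)) | some m => (some m, v m)) =
        (match ks.foldl
            (fun acc x => match acc with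
              | none => some x
              | some m => if v m < v x then some x else some m) o with
          | none => ((none : Option Int), (-1 : Int)) | some m => (some m, v m)) := by
  induction ks with
  | nil => intro o _ _; rfl
  | cons k t ih =>
    intro o hk ho
    have hk0 : -1 < v k := hk k (List.mem_cons_self)
    have hkt : ∀ x ∈ t, -1 < v x := fun x hx => hk x (List.mem_cons_of_mem _ hx)
    rcases ho with rfl | ⟨m, rfl, hm⟩
    · simp only [List.map_cons, List.foldl_cons, if_pos hk0]
      exact ih (some k) hkt (Or.inr ⟨k, rfl, hk0⟩)
    · simp only [List.map_cons, List.foldl_cons]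
      by_cases hlt : v m < v k
      · rw [if_pos hlt, if_pos hlt]
        exact ih (some k) hkt (Or.inr ⟨k, rfl, hk0⟩)
      · rw [if_neg hlt, if_neg hlt]
        exact ih (some m) hkt (Or.inr ⟨m, rfl, hm⟩)

-- ===== VERDICT (by name: the statement is the Claim_ definition above) =====
theorem mom_heuristic_spec : Claim_equal_mom_heuristic := by
  intro clauses _ hpre
  unfold Spec_mom_heuristic
  by_cases hnil : clauses = []
  · subst hnil; rfl
  rcases hpre with h | h
  · exact absurd h hnil
  obtain ⟨m, hm, hmin, hrun⟩ := momAlt_run_none clauses h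
  -- the common count dict is Counter of the flattened min-size clauses
  set xs := (clauses.filter (fun c => c.length == m)).flatten with hxs
  have hA : mom_heuristic clauses =
      (if (PySem.Dict.counter xs).size ≠ 0 then
        match PySem.List.max? (PySem.Dict.counter xs).keys
            (fun lit => (PySem.Dict.counter xs).getD lit 0) with
        | some best => (some |best|, some (decide (0 < best)))
        | none => ((none : Option Int), (none : Option Bool))
      else (none, none)) := by
    unfold mom_heuristic
    rw [if_neg (by simp [hnil]), hmin]
    dsimp only
    rw [← List.foldl_flatten]
    rfl
  have hcnt : xs.foldl ins PySem.Dict.empty = PySem.Dict.counter xs := rfl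
  have hB : mom_heuristic_alt clauses =
      (if (PySem.Dict.counter xs).size = 0 then ((none : Option Int), (none : Option Bool)) else
        match ((PySem.Dict.counter xs).items.foldl
            (fun acc p => if acc.2 < p.2 then (some p.1, p.2) else acc)
            ((none : Option Int), (-1 : Int))).1 with
        | some b => (some |b|, some (decide (0 < b)))
        | none => (none, none)) := by
    unfold mom_heuristic_alt
    rw [if_neg hnil, hrun]
    simp only [hcnt]
  -- xs is non-empty: the minimum m is attained by some clause
  obtain ⟨c0, hc0mem, hc0⟩ : ∃ c ∈ clauses, c.length = m := by
    have := PySem.List.min?_mem hmin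
    simp only [List.mem_map, List.mem_filter] at this
    obtain ⟨c, ⟨hcm, _⟩, hcl⟩ := this
    exact ⟨c, hcm, hcl⟩
  have hxs_ne : xs ≠ [] := by
    have hc0ne : c0 ≠ [] := by
      intro hn; rw [hn] at hc0; simp at hc0; omega
    obtain ⟨a, ha⟩ := List.exists_mem_of_ne_nil c0 hc0ne
    have : a ∈ xs := by
      rw [hxs, List.mem_flatten]
      exact ⟨c0, List.mem_filter.mpr ⟨hc0mem, by simp [hc0]⟩, ha⟩
    intro hn; rw [hn] at this; simp at this
  -- keys are the distinct literals, values their counts ≥ 1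
  have hkeys : (PySem.Dict.counter xs).keys = PySem.Set.ofList xs := PySem.Dict.keys_counter xs
  have hksne : (PySem.Dict.counter xs).keys ≠ [] := by
    rw [hkeys]
    obtain ⟨a, ha⟩ := List.exists_mem_of_ne_nil xs hxs_ne
    intro hn
    have : a ∈ PySem.Set.ofList xs := (PySem.Set.mem_ofList xs a).mpr ha
    rw [hn] at this; simp at this
  have hsz : (PySem.Dict.counter xs).size ≠ 0 := by
    have : (PySem.Dict.counter xs).keys.length = (PySem.Dict.counter xs).size := by
      simp [PySem.Dict.keys, PySem.Dict.size]
    intro hn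
    rw [hn] at this
    exact hksne (List.eq_nil_of_length_eq_zero this)
  have hvalpos : ∀ k ∈ (PySem.Dict.counter xs).keys, -1 < (PySem.Dict.counter xs).getD k 0 := by
    intro k hk
    rw [PySem.Dict.getD_counter]
    have : k ∈ xs := (PySem.Set.mem_ofList xs k).mp (hkeys ▸ hk)
    have := List.count_pos_iff.mpr this
    omega
  -- rewrite items as keys paired with their counts, then apply the scan lemma
  have hitems : (PySem.Dict.counter xs).items =
      (PySem.Dict.counter xs).keys.map (fun k => (k, (PySem.Dict.counter xs).getD k 0)) :=
    PySem.Dict.items_eq_map_keys _ (PySem.Dict.nodup_keys_counter xs) 0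
  have hfold := foldl_pairs_max (fun lit => (PySem.Dict.counter xs).getD lit 0)
      (PySem.Dict.counter xs).keys none hvalpos (Or.inl rfl)
  rw [hA, hB, if_pos hsz, if_neg hsz, hitems]
  have hmaxdef : PySem.List.max? (PySem.Dict.counter xs).keys
      (fun lit => (PySem.Dict.counter xs).getD lit 0) =
      (PySem.Dict.counter xs).keys.foldl
        (fun acc x => match acc with
          | none => some x
          | some m' => if (PySem.Dict.counter xs).getD m' 0 < (PySem.Dict.counter xs).getD x 0
                       then some x else some m') none := by
    simp [PySem.List.max?]
    congr 1
    funext acc x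
    cases acc <;> simp
  rw [hmaxdef]
  cases hcase : (PySem.Dict.counter xs).keys.foldl
      (fun acc x => match acc with
        | none => some x
        | some m' => if (PySem.Dict.counter xs).getD m' 0 < (PySem.Dict.counter xs).getD x 0
                     then some x else some m') none with
  | none =>
    rw [hcase] at hfold
    simp only [hfold]
  | some b =>
    rw [hcase] at hfold
    simp only [hfold]

theorem mom_heuristic_raises : Claim_raises_mom_heuristic := by
  unfold Claim_raises_mom_heuristic
  constructor
  · intro clauses _ ⟨hne, hall⟩ hpre
    rcases hpre with h | ⟨c, hc, hcne⟩
    · exact hne h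
    · exact hcne (hall c hc)
  · exact ⟨by decide, by decide, by decide⟩

-- self-check: the raises claim indeed yields that the raise witness falls outside Pre_
theorem mom_heuristic_raise_witness_not_pre_ok :
    ¬ Pre_mom_heuristic pvRaiseWitness_mom_heuristic :=
  mom_heuristic_raises.1 pvRaiseWitness_mom_heuristic (by decide) (by decide)
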